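-- pv_equiv track=rewrite | github.com/ajmarin/coding | leetcode/03856_trim_trailing_vowels.py | trimTrailingVowels
-- ===== SOURCE A (Python) =====
-- def trimTrailingVowels(s: str) -> str:
--     VOWELS = set("aeiou")
--     for right in range(len(s) - 1, -1, -1):
--         if s[right] not in VOWELS:
--             break
--     else:
--         return ""
--     return s[: right + 1]
-- ===== SOURCE B (Python) =====
-- def trimTrailingVowels(s: str) -> str:
--     VOWELS = set("aeiou")
--     cut = 0
--     for i, ch in enumerate(s):
--         if ch not in VOWELS:
--             cut = i + 1
--     return s[:cut]
-- ===== Notes on version B (the rewrite author's own statement) =====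
-- stated objective: alternative
-- what changed: Replaces the backward early-break scan (for/else over range(len(s)-1,-1,-1)) with a single forward pass that maintains a running last-non-vowel boundary and slices once at the end.
import Mathlib
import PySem

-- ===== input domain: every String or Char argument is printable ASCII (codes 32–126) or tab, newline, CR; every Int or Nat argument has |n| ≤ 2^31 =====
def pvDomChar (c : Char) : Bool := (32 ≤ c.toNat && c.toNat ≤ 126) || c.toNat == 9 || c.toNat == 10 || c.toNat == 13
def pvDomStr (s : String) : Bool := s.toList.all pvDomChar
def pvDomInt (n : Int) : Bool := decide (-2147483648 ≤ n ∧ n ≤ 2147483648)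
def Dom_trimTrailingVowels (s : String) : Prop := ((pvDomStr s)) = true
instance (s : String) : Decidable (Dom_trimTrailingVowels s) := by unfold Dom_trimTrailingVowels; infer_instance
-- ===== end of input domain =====

-- B changes the decomposition: a single forward pass maintaining a running last-non-vowel
-- boundary, instead of A's backward early-break scan (same O(n) cost).

-- ch in set("aeiou")
def pvIsVowel (c : Char) : Bool := c == 'a' || c == 'e' || c == 'i' || c == 'o' || c == 'u'

-- ===== PORT A =====
-- the backward 'for right in range(len(s)-1, -1, -1): if s[right] not in VOWELS: break / else: return ""'
-- 'some r' = loop broke at index r; 'none' = loop exhausted (the for-else branch)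
def pvLoopA (cs : List Char) : List Int → Option Int
  | [] => none
  | r :: rest =>
    match PySem.List.pyGet? cs r with
    | some c => if pvIsVowel c then pvLoopA cs rest else some r
    | none => none   -- unreachable: every r produced by the range is a valid index

def trimTrailingVowels (s : String) : String :=
  match pvLoopA s.toList (PySem.List.pyRange (PySem.Str.len s - 1) (-1) (-1)) with
  | none => ""
  | some r => PySem.Str.slice s none (some (r + 1))

-- ===== PORT B =====
def trimTrailingVowels_alt (s : String) : String :=
  let cut := (PySem.List.enumerate s.toList 0).foldl
    (fun cut p => if pvIsVowel p.2 then cut else p.1 + 1) 0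
  PySem.Str.slice s none (some cut)

-- ===== PRECONDITION & SPEC =====
def Spec_trimTrailingVowels (s : String) (out : String) : Prop := out = trimTrailingVowels_alt s
instance (s : String) (out : String) : Decidable (Spec_trimTrailingVowels s out) := by unfold Spec_trimTrailingVowels; infer_instance

-- ===== CLAIM (what is proved, stated in full; the proofs are below) =====
def Claim_equal_trimTrailingVowels : Prop := ∀ (s : String), Dom_trimTrailingVowels s → Spec_trimTrailingVowels s (trimTrailingVowels s)

-- ===== LEMMAS AND PROOFS =====

-- the common reference value: the list with trailing vowels removed
def pvCore (cs : List Char) : List Char := (cs.reverse.dropWhile pvIsVowel).reverse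

lemma pvCore_append (cs : List Char) (x : Char) :
    pvCore (cs ++ [x]) = if pvIsVowel x then pvCore cs else cs ++ [x] := by
  simp [pvCore, List.dropWhile]
  split_ifs with h <;> simp [h]

-- A's loop ignores an appended element when every index it visits lies inside the prefix
lemma pvLoopA_append (cs : List Char) (x : Char) (rng : List Int)
    (h : ∀ r ∈ rng, 0 ≤ r ∧ r < (cs.length : Int)) :
    pvLoopA (cs ++ [x]) rng = pvLoopA cs rng := by
  induction rng with
  | nil => rfl
  | cons r rest ih =>
    have hr := h r (by simp)
    have hget : PySem.List.pyGet? (cs ++ [x]) r = PySem.List.pyGet? cs r := by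
      rw [PySem.List.pyGet?_of_nonneg (cs ++ [x]) hr.1, PySem.List.pyGet?_of_nonneg cs hr.1]
      have : r.toNat < cs.length := by omega
      simp [List.getElem?_append_left this]
    simp only [pvLoopA, hget]
    cases PySem.List.pyGet? cs r with
    | none => rfl
    | some c =>
      by_cases hv : pvIsVowel c <;>
        simp [hv, ih (fun q hq => h q (by simp [hq]))]

-- A's loop result characterised: it finds the index just past the trailing-vowel block
lemma pvLoopA_spec (cs : List Char) :
    pvLoopA cs (PySem.List.pyRange ((cs.length : Int) - 1) (-1) (-1)) =
      if pvCore cs = [] then none else some ((pvCore cs).length - 1 : Int) := by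
  induction cs using List.reverseRecOn with
  | nil => simp [PySem.List.pyRange_neg_one_eq_nil, pvLoopA, pvCore]
  | append_singleton cs x ih =>
    have hlen : ((cs ++ [x]).length : Int) - 1 = (cs.length : Int) := by simp
    rw [hlen, PySem.List.pyRange_neg_one_cons (by omega)]
    simp only [pvLoopA, PySem.List.pyGet?_append_length]
    by_cases hv : pvIsVowel x
    · rw [if_pos hv]
      rw [pvLoopA_append cs x _ (by
        intro r hr
        have := (PySem.List.mem_pyRange_neg_one).1 hr
        omega)]
      rw [ih, pvCore_append, if_pos hv]
    · rw [if_neg hv, pvCore_append, if_neg hv]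
      have : cs ++ [x] ≠ [] := by simp
      simp

-- B's running boundary computes the length of the trimmed list
lemma pvCut_spec (cs : List Char) :
    (PySem.List.enumerate cs 0).foldl
        (fun cut p => if pvIsVowel p.2 then cut else p.1 + 1) 0 =
      ((pvCore cs).length : Int) := by
  induction cs using List.reverseRecOn with
  | nil => simp [PySem.List.enumerate_nil, pvCore]
  | append_singleton cs x ih =>
    rw [PySem.List.enumerate_append]
    simp only [List.foldl_append, ih, PySem.List.enumerate_cons, PySem.List.enumerate_nil,
      List.foldl_cons, List.foldl_nil]
    rw [pvCore_append]
    by_cases hv : pvIsVowel x <;> simp [hv]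

-- ===== VERDICT (by name: the statement is the Claim_ definition above) =====
theorem trimTrailingVowels_spec : Claim_equal_trimTrailingVowels := by
  intro s _
  unfold Spec_trimTrailingVowels trimTrailingVowels trimTrailingVowels_alt
  have hlen : PySem.Str.len s - 1 = (s.toList.length : Int) - 1 := by
    simp [PySem.Str.len_eq]
  rw [hlen, pvLoopA_spec, pvCut_spec]
  by_cases h : pvCore s.toList = []
  · rw [if_pos h]
    apply String.toList_inj.mp
    simp [h, PySem.List.slice_to s.toList (le_refl (0:Int))]
  · rw [if_neg h]
    have hpos : 0 < (pvCore s.toList).length := List.length_pos_of_ne_nil h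
    have : ((pvCore s.toList).length : Int) - 1 + 1 = ((pvCore s.toList).length : Int) := by omega
    show PySem.Str.slice s none (some (((pvCore s.toList).length : Int) - 1 + 1)) =
      PySem.Str.slice s none (some ((pvCore s.toList).length : Int))
    rw [this]
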